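-- pv_equiv track=rewrite | github.com/AG235HB/Python_algorithms | auxiliary/text_formater.py | find_separator
-- ===== SOURCE A (Python) =====
-- def find_separator(string):
--     for index, item in enumerate(string):
--         if item==',':
--             return ','
--         elif item=='|':
--             return '|'
--         elif item==';':
--             return ';'
--
--     return None
-- ===== SOURCE B (Python) =====
-- def find_separator(string):
--     # Build the first-occurrence index of each separator with str.find,
--     # then select the separator with the smallest index; None if all absent.
--     best = None
--     for sep in (',', '|', ';'):
--         i = string.find(sep)
--         if i != -1 and (best is None or i < best[0]):
--             best = (i, sep)
--     return best[1] if best is not None else None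
-- ===== Notes on version B (the rewrite author's own statement) =====
-- stated objective: faster
-- what changed: Replaces the single left-to-right per-character scan with a position-table strategy: str.find computes each separator's first index once and the separator with the smallest index is selected.
import Mathlib
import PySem

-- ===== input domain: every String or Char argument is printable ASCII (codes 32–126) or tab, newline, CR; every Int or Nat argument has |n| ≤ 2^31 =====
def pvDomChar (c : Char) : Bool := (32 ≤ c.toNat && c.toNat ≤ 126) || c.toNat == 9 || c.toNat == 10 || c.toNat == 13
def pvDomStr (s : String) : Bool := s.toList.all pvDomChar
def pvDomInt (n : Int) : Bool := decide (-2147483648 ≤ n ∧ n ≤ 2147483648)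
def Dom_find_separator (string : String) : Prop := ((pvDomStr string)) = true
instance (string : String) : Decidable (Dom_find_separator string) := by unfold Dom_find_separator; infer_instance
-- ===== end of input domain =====

-- B replaces A's per-character Python scan with a per-separator str.find position
-- table from which the separator with the smallest index is selected (faster by a
-- constant factor: the scan moves into the C-level str.find).

-- ===== PORT A =====
-- A's for-loop over the characters (the enumerate index is unused).
def findSepScan : List Char → Option String
  | [] => none
  | c :: rest =>
    if c = ',' then some ","
    else if c = '|' then some "|"
    else if c = ';' then some ";"
    else findSepScan rest

def find_separator (string : String) : Option String :=
  findSepScan string.toList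

-- ===== PORT B =====
-- one step of B's for-loop over the three separators
def findSepStep (s : String) (best : Option (Int × String)) (sep : String) : Option (Int × String) :=
  let i := PySem.Str.find s sep
  if i ≠ -1 ∧ (best = none ∨ ∀ b ∈ best, i < b.1) then some (i, sep) else best

def find_separator_alt (string : String) : Option String :=
  match [",", "|", ";"].foldl (findSepStep string) none with
  | some b => some b.2
  | none => none

-- ===== PRECONDITION & SPEC =====
def Spec_find_separator (string : String) (out : Option String) : Prop := out = find_separator_alt string
instance (string : String) (out : Option String) : Decidable (Spec_find_separator string out) := by unfold Spec_find_separator; infer_instance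

-- ===== CLAIM (what is proved, stated in full; the proofs are below) =====
def Claim_equal_find_separator : Prop := ∀ (string : String), Dom_find_separator string → Spec_find_separator string (find_separator string)

-- ===== LEMMAS AND PROOFS =====

-- first index of x in s, none if absent
def mOf (x : Char) (s : List Char) : Option Nat := if x ∈ s then some (s.idxOf x) else none

-- one update of B's "best" state, at the Nat level
def upd (best : Option (Nat × String)) (i : Option Nat) (sep : String) : Option (Nat × String) :=
  match i with
  | none => best
  | some n =>
    match best with
    | none => some (n, sep)
    | some b => if n < b.1 then some (n, sep) else best

def pick (a b c : Option Nat) : Option String :=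
  (upd (upd (upd none a ",") b "|") c ";").map (·.2)

theorem idxOf_le_of_getElem? {s : List Char} {x : Char} {i : Nat}
    (h : s[i]? = some x) : s.idxOf x ≤ i := by
  induction s generalizing i with
  | nil => simp at h
  | cons c rest ih =>
    cases i with
    | zero => simp_all [List.idxOf_cons]
    | succ j =>
      simp only [List.getElem?_cons_succ] at h
      by_cases hc : c = x
      · simp [List.idxOf_cons, hc]
      · simpa [List.idxOf_cons, hc] using Nat.succ_le_succ (ih h)

theorem singleton_prefix_iff {x : Char} {l : List Char} :
    [x] <+: l ↔ l.head? = some x := by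
  cases l with
  | nil => simp
  | cons c rest =>
    constructor
    · intro ⟨t, ht⟩; simp at ht; simp [ht.1]
    · intro h; simp at h; exact ⟨rest, by simp [h]⟩

-- str.find of a single character = first index, -1 if absent
theorem find_single (s : List Char) (x : Char) :
    PySem.Chars.find s [x] = if x ∈ s then (s.idxOf x : Int) else -1 := by
  by_cases h : x ∈ s
  · simp only [h, if_true]
    have hinf : [x] <:+: s := by
      obtain ⟨t1, t2, rfl⟩ := List.append_of_mem h
      exact ⟨t1, t2, by simp⟩
    have hnn : 0 ≤ PySem.Chars.find s [x] := (PySem.Chars.find_nonneg_iff s [x]).mpr hinf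
    obtain ⟨hpre, hmin⟩ := PySem.Chars.find_spec hnn
    set n := (PySem.Chars.find s [x]).toNat with hn
    have hget : s[n]? = some x := by
      have := singleton_prefix_iff.mp hpre
      rwa [List.head?_drop] at this
    have h1 : s.idxOf x ≤ n := idxOf_le_of_getElem? hget
    have h2 : n ≤ s.idxOf x := by
      by_contra hlt
      push_neg at hlt
      have hg : s[s.idxOf x]? = some x := by
        rw [List.getElem?_eq_getElem (List.idxOf_lt_length_of_mem h)]
        simp [List.getElem_idxOf]
      exact hmin _ hlt (singleton_prefix_iff.mpr (by rwa [List.head?_drop]))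
    have : n = s.idxOf x := le_antisymm h2 h1
    omega
  · simp only [h, if_false]
    apply (PySem.Chars.find_eq_neg_one_iff s [x]).mpr
    intro hinf
    exact h (hinf.sublist.mem (List.mem_singleton_self x))

-- B's port computes pick of the three first-occurrence indices
theorem alt_eq_pick (s : String) :
    find_separator_alt s =
      pick (mOf ',' s.toList) (mOf '|' s.toList) (mOf ';' s.toList) := by
  have hc : PySem.Str.find s "," = if ',' ∈ s.toList then (s.toList.idxOf ',' : Int) else -1 := by
    rw [PySem.Str.find_eq, show (",":String).toList = [','] by decide]
    exact find_single s.toList ','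
  have hp : PySem.Str.find s "|" = if '|' ∈ s.toList then (s.toList.idxOf '|' : Int) else -1 := by
    rw [PySem.Str.find_eq, show ("|":String).toList = ['|'] by decide]
    exact find_single s.toList '|'
  have hs : PySem.Str.find s ";" = if ';' ∈ s.toList then (s.toList.idxOf ';' : Int) else -1 := by
    rw [PySem.Str.find_eq, show (";":String).toList = [';'] by decide]
    exact find_single s.toList ';'
  simp only [find_separator_alt, List.foldl, findSepStep]
  rw [hc, hp, hs]
  by_cases h1 : ',' ∈ s.toList <;> by_cases h2 : '|' ∈ s.toList <;> by_cases h3 : ';' ∈ s.toList <;>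
    (simp only [h1, h2, h3, if_true, if_false, mOf, pick, upd]; split_ifs <;> simp_all)
  all_goals exact ⟨_, by rw [if_neg (by omega)]⟩

theorem pick_first (b c : Option Nat) : pick (some 0) b c = some "," := by
  cases b <;> cases c <;> simp [pick, upd] <;> split_ifs <;> simp_all

theorem pick_second (a c : Option Nat) (ha : ∀ m ∈ a, 0 < m) : pick a (some 0) c = some "|" := by
  cases a <;> cases c <;> simp_all [pick, upd] <;> split_ifs <;> simp_all <;> omega

theorem pick_third (a b : Option Nat) (ha : ∀ m ∈ a, 0 < m) (hb : ∀ m ∈ b, 0 < m) :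
    pick a b (some 0) = some ";" := by
  cases a <;> cases b <;> simp_all [pick, upd] <;> split_ifs <;> simp_all <;> omega

theorem pick_shift (a b c : Option Nat) :
    pick (a.map (· + 1)) (b.map (· + 1)) (c.map (· + 1)) = pick a b c := by
  cases a <;> cases b <;> cases c <;>
    simp only [pick, upd, Option.map, Nat.add_lt_add_iff_right] <;> split_ifs <;> simp_all
  all_goals split_ifs <;> rfl

theorem mOf_self_cons (x : Char) (rest : List Char) : mOf x (x :: rest) = some 0 := by
  simp [mOf, List.idxOf_cons]

theorem mOf_ne_cons {x ch : Char} (rest : List Char) (h : x ≠ ch) :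
    mOf x (ch :: rest) = (mOf x rest).map (· + 1) := by
  have hb : (ch == x) = false := beq_eq_false_iff_ne.mpr (Ne.symm h)
  simp only [mOf, List.mem_cons, List.idxOf_cons, hb, cond_false]
  by_cases hm : x ∈ rest <;> simp [hm, h]

theorem mOf_pos_cons {x ch : Char} {rest : List Char} {m : Nat} (h : x ≠ ch)
    (hm : mOf x (ch :: rest) = some m) : 0 < m := by
  rw [mOf_ne_cons rest h] at hm
  cases h' : mOf x rest <;> simp [h'] at hm <;> omega

-- A's scan selects the separator with the smallest first-occurrence index
theorem scan_eq_pick (s : List Char) :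
    findSepScan s = pick (mOf ',' s) (mOf '|' s) (mOf ';' s) := by
  induction s with
  | nil => rfl
  | cons ch rest ih =>
    by_cases h1 : ch = ','
    · subst h1
      rw [findSepScan, if_pos rfl, mOf_self_cons, pick_first]
    · by_cases h2 : ch = '|'
      · subst h2
        rw [findSepScan, if_neg (by decide), if_pos rfl, mOf_self_cons]
        exact (pick_second _ _ (fun m hm => mOf_pos_cons (by decide) hm)).symm
      · by_cases h3 : ch = ';'
        · subst h3
          rw [findSepScan, if_neg (by decide), if_neg (by decide), if_pos rfl, mOf_self_cons]
          exact (pick_third _ _ (fun m hm => mOf_pos_cons (by decide) hm)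
            (fun m hm => mOf_pos_cons (by decide) hm)).symm
        · rw [findSepScan, if_neg h1, if_neg h2, if_neg h3, ih,
            mOf_ne_cons rest (fun hx => h1 hx.symm), mOf_ne_cons rest (fun hx => h2 hx.symm),
            mOf_ne_cons rest (fun hx => h3 hx.symm), pick_shift]

-- ===== VERDICT (by name: the statement is the Claim_ definition above) =====
theorem find_separator_spec : Claim_equal_find_separator := by
  intro s _
  unfold Spec_find_separator find_separator
  rw [alt_eq_pick, scan_eq_pick]
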